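-- pv_equiv track=rewrite | github.com/Steeeephen/LAVA | assets/tracking.py | timer
-- ===== SOURCE A (Python) =====
-- def timer(time_read, last):
--   if(len(time_read) < 1):
--     return(9999)
--   if(len(time_read) == 1):
--     timer_clean = last + time_read
--     try:
--       return(1200-(int(timer_clean[:-2])*60+int(timer_clean[-2:])))
--     except:
--       return(9999)
--   elif(time_read[0] == '7' and time_read[1] == '7'):
--     return(timer(time_read[2:], last+time_read[:1]))
--   else:
--     return(timer(time_read[1:], last + time_read[:1]))
-- ===== SOURCE B (Python) =====
-- def timer(time_read, last):
--     if not time_read: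
--         return 9999
--     kept = []
--     i, n = 0, len(time_read)
--     while n - i >= 2:
--         kept.append(time_read[i])
--         i += 2 if time_read[i] == '7' and time_read[i + 1] == '7' else 1
--     if i == n:
--         return 9999
--     clean = last + ''.join(kept) + time_read[i]
--     try:
--         return 1200 - (int(clean[:-2]) * 60 + int(clean[-2:]))
--     except ValueError:
--         return 9999
-- ===== Notes on version B (the rewrite author's own statement) =====
-- stated objective: faster
-- what changed: Replaced A's tail recursion, which rebuilds both strings with slices at every step (quadratic), by a single index loop that collects the kept characters into a list and does one final concatenation and parse.
import Mathlib
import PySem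

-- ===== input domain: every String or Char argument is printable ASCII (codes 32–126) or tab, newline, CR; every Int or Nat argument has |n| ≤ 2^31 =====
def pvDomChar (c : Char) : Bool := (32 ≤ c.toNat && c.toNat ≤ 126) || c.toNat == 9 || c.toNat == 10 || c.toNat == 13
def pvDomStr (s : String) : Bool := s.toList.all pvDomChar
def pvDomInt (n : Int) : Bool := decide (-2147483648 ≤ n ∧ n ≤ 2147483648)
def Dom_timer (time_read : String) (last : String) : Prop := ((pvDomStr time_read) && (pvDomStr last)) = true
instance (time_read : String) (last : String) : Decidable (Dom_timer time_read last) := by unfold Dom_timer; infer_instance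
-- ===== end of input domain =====

-- B replaces A's string-rebuilding tail recursion by one index loop collecting the kept
-- characters followed by a single final parse (objective: simpler; same return value).

-- the try/except parse `1200-(int(clean[:-2])*60+int(clean[-2:]))` both Pythons contain verbatim
def parseClean (clean : List Char) : Int :=
  match PySem.Int.ofChars? (PySem.List.slice clean none (some (-2))),
        PySem.Int.ofChars? (PySem.List.slice clean (some (-2)) none) with
  | some a, some b => 1200 - (a * 60 + b)
  | _, _ => 9999

-- ===== PORT A =====
-- A's tail recursion on the string, with the same slices and accumulator `last`
def timerA (tr : List Char) (last : List Char) : Int :=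
  if tr.length < 1 then 9999
  else if tr.length = 1 then parseClean (last ++ tr)
  else if PySem.List.pyGetD tr 0 ' ' = '7' ∧ PySem.List.pyGetD tr 1 ' ' = '7' then
    timerA (PySem.List.slice tr (some 2) none) (last ++ PySem.List.slice tr none (some 1))
  else
    timerA (PySem.List.slice tr (some 1) none) (last ++ PySem.List.slice tr none (some 1))
termination_by tr.length
decreasing_by all_goals (simp [pysem]; omega)

def timer (time_read : String) (last : String) : Int :=
  timerA time_read.toList last.toList

-- ===== PORT B =====
-- B's `while n - i >= 2` loop: walk the suffix, collect the char read at each step,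
-- return (collected chars, remaining suffix of length ≤ 1)
def cleanScan (tr : List Char) : List Char × List Char :=
  match tr with
  | c0 :: c1 :: rest =>
    let sub := cleanScan (if c0 = '7' ∧ c1 = '7' then rest else c1 :: rest)
    (c0 :: sub.1, sub.2)
  | l => ([], l)
termination_by tr.length
decreasing_by split <;> simp

def timer_alt (time_read : String) (last : String) : Int :=
  let tr := time_read.toList
  if tr = [] then 9999
  else
    let s := cleanScan tr
    if s.2 = [] then 9999
    else parseClean (last.toList ++ s.1 ++ [s.2.headD ' '])

-- ===== PRECONDITION & SPEC =====
def Spec_timer (time_read : String) (last : String) (out : Int) : Prop := out = timer_alt time_read last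
instance (time_read : String) (last : String) (out : Int) : Decidable (Spec_timer time_read last out) := by unfold Spec_timer; infer_instance

-- ===== CLAIM (what is proved, stated in full; the proofs are below) =====
def Claim_equal_timer : Prop := ∀ (time_read : String) (last : String), Dom_timer time_read last → Spec_timer time_read last (timer time_read last)

-- ===== LEMMAS AND PROOFS =====

-- core correspondence: A's recursion computes B's scan-then-parse, for every accumulator
theorem timerA_eq_scan (tr last : List Char) :
    timerA tr last =
      (if (cleanScan tr).2 = [] then 9999
       else parseClean (last ++ (cleanScan tr).1 ++ [(cleanScan tr).2.headD ' '])) := by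
  induction hn : tr.length using Nat.strong_induction_on generalizing tr last with
  | _ n ih =>
  match tr with
  | [] => simp [timerA, cleanScan]
  | [c] => simp [timerA, cleanScan]
  | c0 :: c1 :: rest =>
    rw [timerA]
    have hs2 : PySem.List.slice (c0 :: c1 :: rest) (some 2) none = rest := by simp [pysem]
    have hs1 : PySem.List.slice (c0 :: c1 :: rest) (some 1) none = c1 :: rest := by simp [pysem]
    have ht1 : PySem.List.slice (c0 :: c1 :: rest) none (some 1) = [c0] := by simp [pysem]
    have hg0 : PySem.List.pyGetD (c0 :: c1 :: rest) 0 ' ' = c0 := by simp [pysem]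
    have hg1 : PySem.List.pyGetD (c0 :: c1 :: rest) 1 ' ' = c1 := by
      simp [PySem.List.pyGetD, PySem.List.pyGet?, PySem.List.pyIdx?]
    rw [hs2, hs1, ht1, hg0, hg1]
    simp only [List.length_cons, show ¬ (rest.length + 1 + 1 < 1) by omega,
      show ¬ (rest.length + 1 + 1 = 1) by omega, if_false]
    by_cases h : c0 = '7' ∧ c1 = '7'
    · rw [if_pos h, ih rest.length (by subst hn; simp) rest _ rfl]
      rw [show cleanScan (c0 :: c1 :: rest) = (c0 :: (cleanScan rest).1, (cleanScan rest).2) by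
        rw [cleanScan]; simp [if_pos h]]
      split <;> simp
    · rw [if_neg h, ih (rest.length + 1) (by subst hn; simp) (c1 :: rest) _ (by simp)]
      rw [show cleanScan (c0 :: c1 :: rest)
            = (c0 :: (cleanScan (c1 :: rest)).1, (cleanScan (c1 :: rest)).2) by
        rw [cleanScan]; simp [if_neg h]]
      split <;> simp

-- ===== VERDICT (by name: the statement is the Claim_ definition above) =====
theorem timer_spec : Claim_equal_timer := by
  intro s l _
  unfold Spec_timer timer timer_alt
  rw [timerA_eq_scan]
  rcases h : s.toList with _ | ⟨c, rest⟩
  · simp [h, cleanScan]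
  · simp [h]
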